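-- pv_equiv track=rewrite | github.com/yclaireyyy/MyProjects | agents/rz/s0.py | extract_cards
-- ===== SOURCE A (Python) =====
-- ONE_EYED_JACKS = ["js", "jh"]
--
-- TWO_EYED_JACKS = ["jc", "jd"]
--
-- def extract_cards(hand):
--     normal = []
--     o_jacks = []
--     t_jacks = []
--     for each in hand:
--         if each in ONE_EYED_JACKS:
--             o_jacks.append(each)
--         elif each in TWO_EYED_JACKS:
--             t_jacks.append(each)
--         else:
--             normal.append(each)
--     return normal, o_jacks, t_jacks
-- ===== SOURCE B (Python) =====
-- ONE_EYED_JACKS = ["js", "jh"]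
--
-- TWO_EYED_JACKS = ["jc", "jd"]
--
-- def extract_cards(hand):
--     normal = [c for c in hand if c not in ONE_EYED_JACKS and c not in TWO_EYED_JACKS]
--     o_jacks = [c for c in hand if c in ONE_EYED_JACKS]
--     t_jacks = [c for c in hand if c in TWO_EYED_JACKS]
--     return normal, o_jacks, t_jacks
-- ===== Notes on version B (the rewrite author's own statement) =====
-- stated objective: idiomatic
-- what changed: Replaces the single accumulating loop with an if/elif/else by three independent filtered passes (list comprehensions) over the hand, one per returned list.
import Mathlib
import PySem

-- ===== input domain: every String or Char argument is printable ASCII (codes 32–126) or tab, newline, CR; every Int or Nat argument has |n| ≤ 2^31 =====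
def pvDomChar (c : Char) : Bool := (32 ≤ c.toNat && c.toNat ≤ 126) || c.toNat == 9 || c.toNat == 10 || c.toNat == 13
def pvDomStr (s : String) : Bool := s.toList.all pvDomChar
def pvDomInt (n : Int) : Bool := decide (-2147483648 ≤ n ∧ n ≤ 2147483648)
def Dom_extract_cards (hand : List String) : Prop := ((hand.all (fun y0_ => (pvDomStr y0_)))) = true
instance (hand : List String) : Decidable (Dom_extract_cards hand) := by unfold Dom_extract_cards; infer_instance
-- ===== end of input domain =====

-- B replaces A's single classifying loop by three independent filtered passes (idiomatic; same O(n) cost).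

def ONE_EYED_JACKS : List String := ["js", "jh"]

def TWO_EYED_JACKS : List String := ["jc", "jd"]

-- ===== PORT A =====
-- single fold over hand accumulating (normal, o_jacks, t_jacks), appending at the back as Python does
def extract_cards (hand : List String) : List String × List String × List String :=
  hand.foldl (fun (acc : List String × List String × List String) each =>
    let (normal, o_jacks, t_jacks) := acc
    if each ∈ ONE_EYED_JACKS then (normal, o_jacks ++ [each], t_jacks)
    else if each ∈ TWO_EYED_JACKS then (normal, o_jacks, t_jacks ++ [each])
    else (normal ++ [each], o_jacks, t_jacks)) ([], [], [])

-- ===== PORT B =====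
-- three independent filtered passes, one per returned list
def extract_cards_alt (hand : List String) : List String × List String × List String :=
  (hand.filter (fun c => ¬ c ∈ ONE_EYED_JACKS ∧ ¬ c ∈ TWO_EYED_JACKS),
   hand.filter (fun c => c ∈ ONE_EYED_JACKS),
   hand.filter (fun c => c ∈ TWO_EYED_JACKS))

-- ===== PRECONDITION & SPEC =====
def Spec_extract_cards (hand : List String) (out : List String × List String × List String) : Prop := out = extract_cards_alt hand
instance (hand : List String) (out : List String × List String × List String) : Decidable (Spec_extract_cards hand out) := by unfold Spec_extract_cards; infer_instance

-- ===== CLAIM (what is proved, stated in full; the proofs are below) =====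
def Claim_equal_extract_cards : Prop := ∀ (hand : List String), Dom_extract_cards hand → Spec_extract_cards hand (extract_cards hand)

-- ===== LEMMAS AND PROOFS =====

-- loop invariant: the fold starting from (n, o, t) produces the filters appended
theorem extract_cards_foldl_inv (hand n o t : List String) :
    hand.foldl (fun (acc : List String × List String × List String) each =>
      let (normal, o_jacks, t_jacks) := acc
      if each ∈ ONE_EYED_JACKS then (normal, o_jacks ++ [each], t_jacks)
      else if each ∈ TWO_EYED_JACKS then (normal, o_jacks, t_jacks ++ [each])
      else (normal ++ [each], o_jacks, t_jacks)) (n, o, t)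
    = (n ++ hand.filter (fun c => ¬ c ∈ ONE_EYED_JACKS ∧ ¬ c ∈ TWO_EYED_JACKS),
       o ++ hand.filter (fun c => c ∈ ONE_EYED_JACKS),
       t ++ hand.filter (fun c => c ∈ TWO_EYED_JACKS)) := by
  induction hand generalizing n o t with
  | nil => simp
  | cons h rest ih =>
    by_cases h1 : h ∈ ONE_EYED_JACKS
    · have h2 : h ∉ TWO_EYED_JACKS := by
        simp only [ONE_EYED_JACKS, List.mem_cons, List.not_mem_nil, or_false] at h1
        rcases h1 with rfl | rfl <;> decide
      simp [List.foldl, h1, h2, ih]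
    · by_cases h2 : h ∈ TWO_EYED_JACKS
      · simp [List.foldl, h1, h2, ih]
      · simp [List.foldl, h1, h2, ih]

-- ===== VERDICT (by name: the statement is the Claim_ definition above) =====
theorem extract_cards_spec : Claim_equal_extract_cards := by
  intro hand _
  unfold Spec_extract_cards extract_cards extract_cards_alt
  simpa using extract_cards_foldl_inv hand [] [] []
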